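-- pv_equiv track=rewrite | github.com/p2k3m/NovaPDFReader | tools/auto_fixer/auto_fixer.py | extract_failure_snippet
-- ===== SOURCE A (Python) =====
-- def extract_failure_snippet(logs: str, max_chars: int = 800) -> str:
--     """Return the most relevant failure excerpt to share with the LLM."""
--
--     lowered = logs.lower()
--     keywords = ["error", "exception", "fail", "failure", "traceback"]
--     indices = [lowered.rfind(keyword) for keyword in keywords if keyword in lowered]
--     if indices:
--         anchor = max(indices)
--         start = max(0, anchor - 200)
--         end = min(len(logs), anchor + max_chars)
--         snippet = logs[start:end]
--     else:
--         snippet = logs[-max_chars:]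
--     return snippet.strip()
-- ===== SOURCE B (Python) =====
-- def extract_failure_snippet(logs: str, max_chars: int = 800) -> str:
--     """Return the most relevant failure excerpt to share with the LLM."""
--     lowered = logs.lower()
--     keywords = ("error", "exception", "fail", "failure", "traceback")
--     i = len(lowered)
--     while i > 0:
--         i -= 1
--         if lowered.startswith(keywords, i):
--             start = i - 200 if i > 200 else 0
--             end = i + max_chars if i + max_chars < len(logs) else len(logs)
--             return logs[start:end].strip()
--     return logs[-max_chars:].strip()
-- ===== Notes on version B (the rewrite author's own statement) =====
-- stated objective: alternative
-- what changed: A runs five backward rfind scans, collects the last index of each present keyword in a list and takes its max; B makes a single backward walk from the end of the lowered log and returns the window as soon as the first (i.e. latest) keyword match is found, with no index list and early exit.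
import Mathlib
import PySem

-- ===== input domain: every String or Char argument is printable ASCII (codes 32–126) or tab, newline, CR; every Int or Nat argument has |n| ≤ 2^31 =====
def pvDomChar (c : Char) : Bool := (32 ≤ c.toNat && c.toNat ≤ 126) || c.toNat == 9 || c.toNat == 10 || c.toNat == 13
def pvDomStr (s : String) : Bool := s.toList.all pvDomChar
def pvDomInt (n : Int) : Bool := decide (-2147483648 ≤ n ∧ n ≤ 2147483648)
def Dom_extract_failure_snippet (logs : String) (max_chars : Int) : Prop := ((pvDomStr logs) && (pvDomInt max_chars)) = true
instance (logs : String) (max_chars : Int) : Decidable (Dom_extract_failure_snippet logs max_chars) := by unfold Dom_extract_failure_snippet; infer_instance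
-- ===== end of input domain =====

-- B replaces A's five backward rfind scans plus list-of-indices/max reduction by a single
-- backward walk from the end of the log that returns the window at the first (= latest)
-- keyword match (objective: alternative; same return value).

-- the keyword list both programs use
def pvKeywords : List (List Char) :=
  ["error".toList, "exception".toList, "fail".toList, "failure".toList, "traceback".toList]

-- ===== PORT A =====
def extract_failure_snippet (logs : String) (max_chars : Int) : String :=
  let cs := logs.toList
  let lowered := PySem.Chars.lower cs
  -- indices = [lowered.rfind(k) for k in keywords if k in lowered]
  let indices := (pvKeywords.filter (fun kw => PySem.Chars.isIn kw lowered)).map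
      (fun kw => PySem.Chars.rfind lowered kw)
  match indices with
  | x :: t =>      -- if indices: anchor = max(indices)  (max(xs) as the running-max fold)
    let anchor := t.foldl max x
    let start := max 0 (anchor - 200)
    let stop := min (cs.length : Int) (anchor + max_chars)
    String.ofList (PySem.Chars.strip (PySem.List.slice cs (some start) (some stop)))
  | [] =>
    String.ofList (PySem.Chars.strip (PySem.List.slice cs (some (-max_chars)) none))

-- ===== PORT B =====
-- the while-loop of Source B: i counts down from len(lowered)-1; `k+1` means current i = k;
-- startswith(keywords, i) with 0 <= i is exactly: some keyword is a prefix of lowered[i:]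
def pvScanBack (lowered cs : List Char) (max_chars : Int) : Nat → String
  | 0 => String.ofList (PySem.Chars.strip (PySem.List.slice cs (some (-max_chars)) none))
  | k+1 =>
    if pvKeywords.any (fun kw => kw.isPrefixOf (lowered.drop k)) then
      String.ofList (PySem.Chars.strip (PySem.List.slice cs
        (some (if 200 < (k : Int) then (k : Int) - 200 else 0))
        (some (if (k : Int) + max_chars < (cs.length : Int) then (k : Int) + max_chars else (cs.length : Int)))))
    else pvScanBack lowered cs max_chars k

def extract_failure_snippet_alt (logs : String) (max_chars : Int) : String :=
  let lowered := PySem.Chars.lower logs.toList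
  pvScanBack lowered logs.toList max_chars lowered.length

-- ===== PRECONDITION & SPEC =====
def Spec_extract_failure_snippet (logs : String) (max_chars : Int) (out : String) : Prop := out = extract_failure_snippet_alt logs max_chars
instance (logs : String) (max_chars : Int) (out : String) : Decidable (Spec_extract_failure_snippet logs max_chars out) := by unfold Spec_extract_failure_snippet; infer_instance

-- ===== CLAIM (what is proved, stated in full; the proofs are below) =====
def Claim_equal_extract_failure_snippet : Prop := ∀ (logs : String) (max_chars : Int), Dom_extract_failure_snippet logs max_chars → Spec_extract_failure_snippet logs max_chars (extract_failure_snippet logs max_chars)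

-- ===== LEMMAS AND PROOFS =====

-- the last i < k with p i, or -1 (the value A's max-of-rfinds and B's backward scan agree on)
def lastHit (p : Nat → Bool) (k : Nat) : Int :=
  (List.range k).foldl (fun acc i => if p i then (i : Int) else acc) (-1)

theorem lastHit_succ (p : Nat → Bool) (k : Nat) :
    lastHit p (k+1) = if p k then (k : Int) else lastHit p k := by
  simp [lastHit, List.range_succ]

theorem lastHit_bounds (p : Nat → Bool) (k : Nat) :
    -1 ≤ lastHit p k ∧ lastHit p k < k := by
  induction k with
  | zero => simp [lastHit]
  | succ j ih => rw [lastHit_succ]; split <;> push_cast <;> omega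

theorem lastHit_eq_neg_one_iff (p : Nat → Bool) (k : Nat) :
    lastHit p k = -1 ↔ ∀ i < k, p i = false := by
  induction k with
  | zero => simp [lastHit]
  | succ j ih =>
    rw [lastHit_succ]
    rcases h : p j with _ | _
    · rw [if_neg (by simp)]
      constructor
      · intro hh i hi
        rcases Nat.lt_succ_iff_lt_or_eq.1 hi with hi | rfl
        · exact (ih.1 hh) i hi
        · exact h
      · intro hh; exact ih.2 (fun i hi => hh i (Nat.lt_succ_of_lt hi))
    · rw [if_pos rfl]
      constructor
      · intro hh; omega
      · intro hh; exact absurd h (by simp [hh j (Nat.lt_succ_self j)])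

theorem lastHit_or (p q : Nat → Bool) (k : Nat) :
    lastHit (fun i => p i || q i) k = max (lastHit p k) (lastHit q k) := by
  induction k with
  | zero => simp [lastHit]
  | succ j ih =>
    have hp := lastHit_bounds p j
    have hq := lastHit_bounds q j
    rw [lastHit_succ, lastHit_succ, lastHit_succ, ih]
    rcases h1 : p j with _ | _ <;> rcases h2 : q j with _ | _ <;> simp <;> omega

theorem go_eq (s sub : List Char) (k : Nat) :
    PySem.Chars.rfind.go s sub k = lastHit (fun i => sub.isPrefixOf (s.drop i)) (k+1) := by
  induction k with
  | zero => simp [PySem.Chars.rfind.go, lastHit]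
  | succ j ih => rw [PySem.Chars.rfind.go, lastHit_succ]; simp [ih]

theorem rfind_eq_lastHit (s sub : List Char) :
    PySem.Chars.rfind s sub = lastHit (fun i => sub.isPrefixOf (s.drop i)) (s.length + 1) :=
  go_eq s sub s.length

theorem rfind_neg_of_not_isIn (s kw : List Char) (h : PySem.Chars.isIn kw s = false) :
    PySem.Chars.rfind s kw = -1 := by
  rw [rfind_eq_lastHit, lastHit_eq_neg_one_iff]
  intro i _
  by_contra hb
  have hpref : kw <+: s.drop i := List.isPrefixOf_iff_prefix.1 (by simpa using hb)
  exact ((PySem.Chars.isIn_eq_false_iff kw s).1 h)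
    (List.infix_iff_prefix_suffix.2 ⟨s.drop i, hpref, List.drop_suffix i s⟩)

theorem rfind_nonneg_of_isIn (s kw : List Char) (h : PySem.Chars.isIn kw s = true) :
    0 ≤ PySem.Chars.rfind s kw := by
  have hb := lastHit_bounds (fun i => kw.isPrefixOf (s.drop i)) (s.length + 1)
  rw [rfind_eq_lastHit]
  rcases (PySem.Chars.exists_prefix_drop_iff_isIn kw s).2 h with ⟨j, hj⟩
  have hex : ∃ i < s.length + 1, kw.isPrefixOf (s.drop i) = true := by
    rcases Nat.lt_or_ge s.length j with hlt | hle
    · refine ⟨s.length, by omega, List.isPrefixOf_iff_prefix.2 ?_⟩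
      have : s.drop j = [] := List.drop_eq_nil_of_le (by omega)
      rw [this] at hj
      simpa [List.drop_eq_nil_of_le (Nat.le_refl s.length)] using hj
    · exact ⟨j, by omega, List.isPrefixOf_iff_prefix.2 hj⟩
  rcases hex with ⟨i, hi, hpi⟩
  have hne : lastHit (fun i => kw.isPrefixOf (s.drop i)) (s.length + 1) ≠ -1 := by
    rw [Ne, lastHit_eq_neg_one_iff]
    intro hall
    exact absurd hpi (by simp [hall i hi])
  omega

theorem foldl_max_max {α : Type} (l : List α) (g : α → Int) (a b : Int) :
    l.foldl (fun acc x => max acc (g x)) (max a b) = max a (l.foldl (fun acc x => max acc (g x)) b) := by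
  induction l generalizing b with
  | nil => rfl
  | cons x t ih => simp only [List.foldl_cons, max_assoc, ih]

theorem lastHit_any (s : List Char) (kws : List (List Char)) (k : Nat) :
    lastHit (fun i => kws.any (fun kw => kw.isPrefixOf (s.drop i))) k
      = kws.foldl (fun a kw => max a (lastHit (fun i => kw.isPrefixOf (s.drop i)) k)) (-1) := by
  induction kws with
  | nil =>
    simp only [List.any_nil, List.foldl_nil]
    rw [lastHit_eq_neg_one_iff]; intro i _; rfl
  | cons kw t ih =>
    have : (fun i => (kw :: t).any (fun w => w.isPrefixOf (s.drop i)))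
        = (fun i => kw.isPrefixOf (s.drop i) || t.any (fun w => w.isPrefixOf (s.drop i))) := by
      funext i; simp
    rw [this, lastHit_or, ih, List.foldl_cons]
    rw [max_comm (-1) _, ← foldl_max_max]

theorem foldl_max_neg_one_of_all (s : List Char) (kws : List (List Char))
    (h : ∀ kw ∈ kws, PySem.Chars.rfind s kw = -1) :
    kws.foldl (fun a kw => max a (PySem.Chars.rfind s kw)) (-1) = -1 := by
  induction kws with
  | nil => rfl
  | cons kw t ih =>
    simp only [List.foldl_cons, h kw (List.mem_cons_self ..), max_self]
    exact ih (fun w hw => h w (List.mem_cons_of_mem _ hw))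

theorem foldl_filter_max (s : List Char) (kws : List (List Char)) (a : Int) (ha : -1 ≤ a) :
    ((kws.filter (fun kw => PySem.Chars.isIn kw s)).map (fun kw => PySem.Chars.rfind s kw)).foldl max a
      = kws.foldl (fun acc kw => max acc (PySem.Chars.rfind s kw)) a := by
  induction kws generalizing a with
  | nil => rfl
  | cons kw t ih =>
    rcases h : PySem.Chars.isIn kw s with _ | _
    · rw [List.filter_cons_of_neg (by simp [h]), List.foldl_cons,
        rfind_neg_of_not_isIn s kw h, max_eq_left ha]
      exact ih a ha
    · rw [List.filter_cons_of_pos (by simp [h]), List.map_cons, List.foldl_cons, List.foldl_cons]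
      have := rfind_nonneg_of_isIn s kw h
      exact ih _ (by omega)

-- B's backward scan computes exactly "window at lastHit, or the tail fallback"
theorem pvScanBack_eq_lastHit (lowered cs : List Char) (mc : Int) (k : Nat) :
    pvScanBack lowered cs mc k =
      (if lastHit (fun i => pvKeywords.any (fun kw => kw.isPrefixOf (lowered.drop i))) k = -1 then
        String.ofList (PySem.Chars.strip (PySem.List.slice cs (some (-mc)) none))
      else
        String.ofList (PySem.Chars.strip (PySem.List.slice cs
          (some (max 0 (lastHit (fun i => pvKeywords.any (fun kw => kw.isPrefixOf (lowered.drop i))) k - 200)))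
          (some (min (cs.length : Int)
            (lastHit (fun i => pvKeywords.any (fun kw => kw.isPrefixOf (lowered.drop i))) k + mc)))))) := by
  induction k with
  | zero => simp [pvScanBack, lastHit]
  | succ j ih =>
    rcases h : pvKeywords.any (fun kw => kw.isPrefixOf (lowered.drop j)) with _ | _
    · have e : lastHit (fun i => pvKeywords.any (fun kw => kw.isPrefixOf (lowered.drop i))) (j+1)
          = lastHit (fun i => pvKeywords.any (fun kw => kw.isPrefixOf (lowered.drop i))) j := by
        rw [lastHit_succ]; simp [h]
      rw [pvScanBack, if_neg (by simp [h]), e]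
      exact ih
    · have e : lastHit (fun i => pvKeywords.any (fun kw => kw.isPrefixOf (lowered.drop i))) (j+1)
          = (j : Int) := by
        rw [lastHit_succ]; simp [h]
      have h1 : (if 200 < (j : Int) then (j : Int) - 200 else 0) = max 0 ((j : Int) - 200) := by
        split <;> omega
      have h2 : (if (j : Int) + mc < (cs.length : Int) then (j : Int) + mc else (cs.length : Int))
          = min (cs.length : Int) ((j : Int) + mc) := by
        split <;> omega
      rw [pvScanBack, if_pos h, e, h1, h2, if_neg (show ¬((j : Int) = -1) by omega)]

-- ===== VERDICT (by name: the statement is the Claim_ definition above) =====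
theorem extract_failure_snippet_spec : Claim_equal_extract_failure_snippet := by
  intro logs max_chars _
  unfold Spec_extract_failure_snippet
  simp only [extract_failure_snippet, extract_failure_snippet_alt]
  set s := PySem.Chars.lower logs.toList with hs
  rw [pvScanBack_eq_lastHit]
  have hstep : lastHit (fun i => pvKeywords.any (fun kw => kw.isPrefixOf (s.drop i))) (s.length + 1)
      = lastHit (fun i => pvKeywords.any (fun kw => kw.isPrefixOf (s.drop i))) s.length := by
    rw [lastHit_succ]
    have : pvKeywords.any (fun kw => kw.isPrefixOf (s.drop s.length)) = false := by
      rw [List.drop_length]; decide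
    rw [this]; simp
  have hL : lastHit (fun i => pvKeywords.any (fun kw => kw.isPrefixOf (s.drop i))) s.length
      = pvKeywords.foldl (fun a kw => max a (PySem.Chars.rfind s kw)) (-1) := by
    rw [← hstep, lastHit_any]
    simp only [← rfind_eq_lastHit]
  rcases h : (pvKeywords.filter (fun kw => PySem.Chars.isIn kw s)).map
      (fun kw => PySem.Chars.rfind s kw) with _ | ⟨x, t⟩
  · have hall : ∀ kw ∈ pvKeywords, PySem.Chars.rfind s kw = -1 := by
      intro kw hkw
      rcases hin : PySem.Chars.isIn kw s with _ | _
      · exact rfind_neg_of_not_isIn s kw hin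
      · exfalso
        have : kw ∈ pvKeywords.filter (fun kw => PySem.Chars.isIn kw s) :=
          List.mem_filter.2 ⟨hkw, hin⟩
        have := List.mem_map_of_mem (f := fun kw => PySem.Chars.rfind s kw) this
        rw [h] at this
        exact absurd this (List.not_mem_nil)
    rw [hL, foldl_max_neg_one_of_all s pvKeywords hall]
    simp
  · have hx : 0 ≤ x := by
      have hxmem : x ∈ (pvKeywords.filter (fun kw => PySem.Chars.isIn kw s)).map
          (fun kw => PySem.Chars.rfind s kw) := by rw [h]; exact List.mem_cons_self ..
      rcases List.mem_map.1 hxmem with ⟨kw, hkwf, rfl⟩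
      exact rfind_nonneg_of_isIn s kw (List.mem_filter.1 hkwf).2
    have hA : t.foldl max x = pvKeywords.foldl (fun a kw => max a (PySem.Chars.rfind s kw)) (-1) := by
      have : t.foldl max x = ((x :: t).foldl (fun acc v => max acc v) (-1)) := by
        simp only [List.foldl_cons, max_eq_right (show (-1 : Int) ≤ x by omega)]
      rw [this, ← h, foldl_filter_max s pvKeywords (-1) (by omega)]
    have h0 : 0 ≤ pvKeywords.foldl (fun a kw => max a (PySem.Chars.rfind s kw)) (-1) := by
      rw [← hA]
      have := (PySem.List.le_foldl_max t x).1
      omega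
    rw [hL, if_neg (by omega), ← hA]
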